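-- pv_equiv track=rewrite | github.com/Mahesh99/python-june2025 | oops.py | my_special_range
-- ===== SOURCE A (Python) =====
-- def my_special_range(n):
--     count = 0
--     while count < n:
--         yield count
--         count += 1
--     count -= 2
--     while count >= 0 :
--         yield count
--         count -= 1
-- ===== SOURCE B (Python) =====
-- def my_special_range(n):
--     for i in range(2 * n - 1):
--         yield (n - 1) - abs(i - (n - 1))
-- ===== Notes on version B (the rewrite author's own statement) =====
-- stated objective: simpler
-- what changed: Replaces A's two while-loops (count up, then count down) by a single pass over range(2n-1) with the closed-form value (n-1)-|i-(n-1)|.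
import Mathlib
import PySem

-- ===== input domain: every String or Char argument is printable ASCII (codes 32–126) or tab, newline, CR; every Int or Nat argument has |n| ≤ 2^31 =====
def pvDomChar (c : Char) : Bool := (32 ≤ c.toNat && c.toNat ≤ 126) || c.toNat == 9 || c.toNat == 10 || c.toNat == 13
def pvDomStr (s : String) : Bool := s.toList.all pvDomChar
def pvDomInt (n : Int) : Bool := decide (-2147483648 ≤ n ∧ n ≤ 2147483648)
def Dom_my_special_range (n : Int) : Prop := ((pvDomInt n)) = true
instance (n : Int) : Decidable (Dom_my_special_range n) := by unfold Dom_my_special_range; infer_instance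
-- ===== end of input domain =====

-- B replaces A's two while-loops by one pass over range(2n-1) with a closed-form value; objective: simpler.

-- ===== PORT A =====
-- first while loop: yields count while count < n, returns (yielded list, final count)
def pvUpLoop (n count : Int) : List Int × Int :=
  if count < n then
    let r := pvUpLoop n (count + 1)
    (count :: r.1, r.2)
  else ([], count)
termination_by (n - count).toNat
decreasing_by omega

-- second while loop: yields count while count ≥ 0
def pvDownLoop (count : Int) : List Int :=
  if count ≥ 0 then count :: pvDownLoop (count - 1)
  else []
termination_by (count + 1).toNat
decreasing_by omega

def my_special_range (n : Int) : List Int :=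
  let u := pvUpLoop n 0
  u.1 ++ pvDownLoop (u.2 - 2)

-- ===== PORT B =====
def my_special_range_alt (n : Int) : List Int :=
  (PySem.List.pyRange 0 (2 * n - 1) 1).map (fun i => (n - 1) - |i - (n - 1)|)

-- ===== PRECONDITION & SPEC =====
def Spec_my_special_range (n : Int) (out : List Int) : Prop := out = my_special_range_alt n
instance (n : Int) (out : List Int) : Decidable (Spec_my_special_range n out) := by unfold Spec_my_special_range; infer_instance

-- ===== CLAIM (what is proved, stated in full; the proofs are below) =====
def Claim_equal_my_special_range : Prop := ∀ (n : Int), Dom_my_special_range n → Spec_my_special_range n (my_special_range n)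

-- ===== LEMMAS AND PROOFS =====

theorem pvUpLoop_eq (n : Int) : ∀ (m : Nat) (c : Int), c ≤ n → (n - c).toNat ≤ m →
    pvUpLoop n c = (PySem.List.pyRange c n 1, n) := by
  intro m
  induction m with
  | zero =>
    intro c hc hm
    have hcn : c = n := by omega
    rw [pvUpLoop]
    simp [hcn, PySem.List.pyRange_one_eq_nil le_rfl]
  | succ k ih =>
    intro c hc hm
    by_cases h : c < n
    · rw [pvUpLoop, if_pos h, ih (c + 1) (by omega) (by omega),
        PySem.List.pyRange_one_cons h]
    · have hcn : c = n := by omega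
      rw [pvUpLoop]
      simp [hcn, PySem.List.pyRange_one_eq_nil le_rfl]

theorem pvDownLoop_eq : ∀ (m : Nat) (c : Int), (c + 1).toNat ≤ m →
    pvDownLoop c = PySem.List.pyRange c (-1) (-1) := by
  intro m
  induction m with
  | zero =>
    intro c hm
    rw [pvDownLoop, if_neg (by omega), PySem.List.pyRange_neg_one_eq_nil (by omega)]
  | succ k ih =>
    intro c hm
    by_cases h : c ≥ 0
    · rw [pvDownLoop, if_pos h, ih (c - 1) (by omega),
        ← PySem.List.pyRange_neg_one_cons (by omega : (-1 : Int) < c)]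
    · rw [pvDownLoop, if_neg h, PySem.List.pyRange_neg_one_eq_nil (by omega)]

-- ===== VERDICT (by name: the statement is the Claim_ definition above) =====
theorem my_special_range_spec : Claim_equal_my_special_range := by
  intro n _
  unfold Spec_my_special_range my_special_range my_special_range_alt
  by_cases hn : n ≤ 0
  · have h1 : ¬ (0 : Int) < n := by omega
    rw [PySem.List.pyRange_one_eq_nil (by omega : (2 * n - 1 : Int) ≤ 0)]
    simp [pvUpLoop, pvDownLoop, h1]
  · rw [not_le] at hn
    rw [pvUpLoop_eq n (n - 0).toNat 0 (by omega) le_rfl,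
      show (have u := (PySem.List.pyRange 0 n 1, n); u.1 ++ pvDownLoop (u.2 - 2)) = _ from ?_]
    show PySem.List.pyRange 0 n 1 ++ pvDownLoop (n - 2) = _
    rw [pvDownLoop_eq (n - 1).toNat (n - 2) (by omega)]
    rw [PySem.List.pyRange_one_append 0 n (2 * n - 1) (by omega) (by omega), List.map_append]
    congr 1
    · -- rising half maps to itself
      rw [show ((PySem.List.pyRange 0 n 1).map fun i => (n - 1) - |i - (n - 1)|)
            = (PySem.List.pyRange 0 n 1).map id from ?_, List.map_id]
      apply List.map_congr_left
      intro i hi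
      rw [PySem.List.mem_pyRange_one] at hi
      rw [abs_of_nonpos (by omega)]
      simp only [id_eq]
      omega
    · -- falling half: range(n, 2n-1) maps to the countdown n-2 .. 0
      rw [PySem.List.pyRange_one, PySem.List.pyRange_neg_one, List.map_map]
      have hm : (2 * n - 1 - n).toNat = (n - 2 - -1).toNat := by omega
      rw [hm]
      apply List.map_congr_left
      intro k _
      simp only [Function.comp]
      rw [abs_of_nonneg (by omega)]
      omega
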